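-- pv_equiv track=rewrite | github.com/VictorGhissoni/Advent-of-code-2025 | Day 2/Problem_2_v2.py | next_repeated
-- ===== SOURCE A (Python) =====
-- def next_repeated(s:str, n:int, lim: int):
--     if (len(s)%n!= 0):
--         new_word = "1" + "0"*len(s)
--         if (int(new_word)>lim):
--             return new_word
--         return next_repeated(new_word, n, lim)
--     blocks = []
--     start = 0
--     end = start + len(s)//n
--     for _ in (range(n)):
--         blocks.append(s[start:end])
--         start = end
--         end = start + len(s)//n
--     for i in range(len(blocks)):
--         blocks[i] = int(blocks[i])
--     new_word = str(blocks[0])*n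
--     if (int(new_word)<=int(s)):
--         new_word = str(blocks[0]+1)*n
--     return new_word
-- ===== SOURCE B (Python) =====
-- def next_repeated(s, n, lim):
--     L = len(s)
--     dist = (-L) % abs(n)
--     for t in range(L, L + dist):
--         w = '1' + '0' * t
--         if int(w) > lim:
--             return w
--     if dist:
--         s = '1' + '0' * (L + dist - 1)
--     m = (L + dist) // n
--     head = int(s[:m])
--     cand = str(head) * n
--     if int(cand) <= int(s):
--         cand = str(head + 1) * n
--     return cand
-- ===== Notes on version B (the rewrite author's own statement) =====
-- stated objective: alternative
-- what changed: A's tail recursion that repeatedly rebuilds the string is replaced by computing the number of padding steps in closed form ((-len) % abs(n)) and scanning the padding candidates with one for-loop over that range, and the block phase drops the blocks list entirely: instead of slicing all n blocks in a start/end loop and int()-converting every one, B converts only the first block s[:m], the only value the result uses.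
import Mathlib
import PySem

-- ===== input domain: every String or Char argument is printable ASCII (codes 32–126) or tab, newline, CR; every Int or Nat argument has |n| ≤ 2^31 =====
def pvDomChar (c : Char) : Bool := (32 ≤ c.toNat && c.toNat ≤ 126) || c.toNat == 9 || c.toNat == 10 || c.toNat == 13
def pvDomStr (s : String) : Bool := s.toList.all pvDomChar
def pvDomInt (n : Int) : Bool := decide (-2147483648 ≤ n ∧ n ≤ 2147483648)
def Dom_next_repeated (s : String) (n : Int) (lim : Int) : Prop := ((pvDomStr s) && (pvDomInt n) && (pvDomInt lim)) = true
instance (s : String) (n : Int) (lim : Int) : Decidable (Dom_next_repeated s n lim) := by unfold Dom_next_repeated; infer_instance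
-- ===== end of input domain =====

-- B replaces A's tail recursion over the whole string state: it computes the number of
-- padding steps in closed form ((-len) % abs(n)), scans the padding candidates with one
-- for-loop over that range, and converts only the first block instead of building and
-- int()-converting all n blocks (objective: alternative decomposition).


-- ===== PORT A =====
-- dist = (-L) % abs(n) : how many padding steps A's recursion would take (Source B line 3).
def pvDist (n : Int) (p : Nat) : Nat :=
  (PySem.Int.mod (-(p : Int)) ((n.natAbs : Nat) : Int)).toNat

-- int(cs): Python raises ValueError exactly where ofChars? is none; Pre_ excludes those inputs.
def pvInt (cs : List Char) : Int := (PySem.Int.ofChars? cs).getD 0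

-- A's code after the "len%n == 0" test: the start/end loop appends the n slices to `blocks`,
-- every block is int()-converted in place, new_word = str(blocks[0])*n, bumped to
-- str(blocks[0]+1)*n when int(new_word) <= int(s).  blocks[0] on an empty list is IndexError
-- (only n < 1 reaches it); Pre_ excludes that.
def pvBlockA (cs : List Char) (n : Int) : List Char :=
  let m := PySem.Int.floordiv ((cs.length : Int)) n
  let st := (PySem.List.pyRange 0 n 1).foldl
    (fun (acc : List (List Char) × Int × Int) _ =>
      (acc.1 ++ [PySem.List.slice cs (some acc.2.1) (some acc.2.2)], acc.2.2, acc.2.2 + m))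
    ([], 0, m)
  let blocks := st.1.map pvInt
  let b0 := (PySem.List.pyGet? blocks 0).getD 0
  let new_word := PySem.List.pyRepeat (PySem.Int.toChars b0) n
  if pvInt new_word ≤ pvInt cs then PySem.List.pyRepeat (PySem.Int.toChars (b0 + 1)) n
  else new_word

-- A's recursion, with fuel for totality only: the string length grows by 1 per call and the
-- recursion stops when it is divisible by n, so within |n| steps; fuel |n|+1 is never
-- exhausted on inputs the claim covers.
def next_repeatedFuel : Nat → List Char → Int → Int → List Char
  | 0, cs, _, _ => cs
  | fuel + 1, cs, n, lim =>
    if PySem.Int.mod ((cs.length : Int)) n ≠ 0 then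
      let new_word : List Char := '1' :: List.replicate cs.length '0'
      if pvInt new_word > lim then new_word
      else next_repeatedFuel fuel new_word n lim
    else pvBlockA cs n

def next_repeated (s : String) (n : Int) (lim : Int) : String :=
  String.mk (next_repeatedFuel (pvDist n s.toList.length + 1) s.toList n lim)

-- ===== PORT B =====
-- Source B's final four lines: head = int(s[:m]); cand = str(head)*n, bumped when int(cand) <= int(s).
def altBlock (cs : List Char) (n : Int) (tot : Int) : List Char :=
  let m := PySem.Int.floordiv tot n
  let head := pvInt (PySem.List.slice cs none (some m))
  let cand := PySem.List.pyRepeat (PySem.Int.toChars head) n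
  if pvInt cand ≤ pvInt cs then PySem.List.pyRepeat (PySem.Int.toChars (head + 1)) n
  else cand

-- Source B's `for t in range(L, L+dist): w = '1'+'0'*t; if int(w) > lim: return w`, ported as a
-- recursive scan over the (lazy) range, with fuel for totality only (the scan takes at most
-- dist steps).
def altScan : Nat → Nat → Nat → Int → Option Nat
  | 0, _, _, _ => none
  | fuel + 1, t, stop, lim =>
    if t < stop then
      if lim < pvInt ('1' :: List.replicate t '0') then some t
      else altScan fuel (t + 1) stop lim
    else none

def next_repeated_alt (s : String) (n : Int) (lim : Int) : String :=
  let cs := s.toList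
  let L := cs.length
  let dist := pvDist n L
  match altScan (dist + 1) L (L + dist) lim with
  | some t => String.mk ('1' :: List.replicate t '0')
  | none =>
      let cs2 := if dist ≠ 0 then '1' :: List.replicate (L + dist - 1) '0' else cs
      String.mk (altBlock cs2 n ((L : Int) + (dist : Int)))

-- ===== PRECONDITION & SPEC =====
-- Pre_ excludes exactly the inputs on which the Python A raises: n = 0 (ZeroDivisionError from
-- len(s)%n); n >= 1 with len(s) divisible by n and some block slice or s itself not int()-able
-- (ValueError), or blocks[0] < 0 with n >= 2 (str(blocks[0])*n is not int()-able, ValueError);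
-- and n <= -1 inputs that reach the empty block list (IndexError on blocks[0]), i.e. where no
-- padding candidate exceeds lim before the length becomes divisible (on the whole domain Dom,
-- where |lim| <= 2^31 < 10^11, a candidate that exceeds lim exists among the first
-- min(dist, 12) padding steps whenever one exists at all, so the bounded existential is exact).
def Pre_next_repeated (s : String) (n : Int) (lim : Int) : Prop :=
  (1 ≤ n ∧ (PySem.Int.mod ((s.toList.length : Int)) n ≠ 0 ∨
    (s.toList ≠ [] ∧
     (∀ i ∈ List.range n.toNat,
        (PySem.Int.ofChars? (PySem.List.slice s.toList
          (some ((i : Int) * PySem.Int.floordiv ((s.toList.length : Int)) n))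
          (some (((i : Int) + 1) * PySem.Int.floordiv ((s.toList.length : Int)) n)))).isSome = true)
     ∧ (PySem.Int.ofChars? s.toList).isSome = true
     ∧ (0 ≤ (PySem.Int.ofChars? (PySem.List.slice s.toList (some 0)
          (some (PySem.Int.floordiv ((s.toList.length : Int)) n)))).getD 0 ∨ n = 1))))
  ∨ (n ≤ -1 ∧ ∃ j ∈ List.range (min (pvDist n s.toList.length) 12),
      lim < (PySem.Int.ofChars? ('1' :: List.replicate (s.toList.length + j) '0')).getD 0)

instance (s : String) (n : Int) (lim : Int) : Decidable (Pre_next_repeated s n lim) := by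
  unfold Pre_next_repeated; infer_instance

def pvWitness_next_repeated : String × Int × Int := ("12", 2, 100)

def Spec_next_repeated (s : String) (n : Int) (lim : Int) (out : String) : Prop :=
  out = next_repeated_alt s n lim
instance (s : String) (n : Int) (lim : Int) (out : String) : Decidable (Spec_next_repeated s n lim out) := by
  unfold Spec_next_repeated; infer_instance

-- ===== CLAIM (what is proved, stated in full; the proofs are below) =====
def Claim_equal_next_repeated : Prop := ∀ (s : String) (n : Int) (lim : Int), Dom_next_repeated s n lim → Pre_next_repeated s n lim → Spec_next_repeated s n lim (next_repeated s n lim)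

-- ===== LEMMAS AND PROOFS =====

-- the block-building fold only appends to its first component
lemma pvFold_fst (cs : List Char) (m : Int) (l : List Int) :
    ∀ (bs : List (List Char)) (a b : Int), ∃ t,
      (l.foldl (fun (acc : List (List Char) × Int × Int) _ =>
        (acc.1 ++ [PySem.List.slice cs (some acc.2.1) (some acc.2.2)], acc.2.2, acc.2.2 + m))
        (bs, a, b)).1 = bs ++ t := by
  induction l with
  | nil => intro bs a b; exact ⟨[], by simp⟩
  | cons x xs ih =>
      intro bs a b
      obtain ⟨t, ht⟩ := ih (bs ++ [PySem.List.slice cs (some a) (some b)]) b (b + m)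
      exact ⟨PySem.List.slice cs (some a) (some b) :: t, by simpa using ht⟩

-- A's block phase equals B's: only the first block's value is ever used
lemma pvBlock_eq (cs : List Char) (n : Int) (hn : 1 ≤ n) :
    pvBlockA cs n = altBlock cs n ((cs.length : Int)) := by
  unfold pvBlockA altBlock
  rw [PySem.List.pyRange_one_cons (by omega : (0:Int) < n)]
  simp only [List.foldl_cons]
  obtain ⟨t, ht⟩ := pvFold_fst cs (PySem.Int.floordiv ((cs.length : Int)) n)
    (PySem.List.pyRange (0+1) n 1)
    ([] ++ [PySem.List.slice cs (some 0) (some (PySem.Int.floordiv ((cs.length : Int)) n))])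
    (PySem.Int.floordiv ((cs.length : Int)) n)
    (PySem.Int.floordiv ((cs.length : Int)) n + PySem.Int.floordiv ((cs.length : Int)) n)
  rw [ht]
  simp [PySem.List.pyGet?, PySem.List.pyIdx?]

-- pvDist n p = 0 exactly when A's test len % n == 0 fires
lemma pvDist_zero_iff (n : Int) (p : Nat) (hn : n ≠ 0) :
    PySem.Int.mod ((p : Nat) : Int) n = 0 ↔ pvDist n p = 0 := by
  have ha : (0:Int) < ((n.natAbs : Nat) : Int) := by
    have := Int.natAbs_pos.mpr hn; exact_mod_cast this
  rw [PySem.Int.mod_eq_zero_iff_dvd]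
  unfold pvDist
  rw [PySem.Int.mod_eq_emod_of_pos ha]
  have hr0 : 0 ≤ (-(p:Int)) % ((n.natAbs : Nat) : Int) := Int.emod_nonneg _ (by omega)
  constructor
  · intro h
    have hd : ((n.natAbs : Nat) : Int) ∣ (-(p:Int)) :=
      (Int.dvd_neg).mpr (Int.natAbs_dvd.mpr h)
    have he : (-(p:Int)) % ((n.natAbs : Nat) : Int) = 0 :=
      (PySem.Int.emod_eq_zero_iff_dvd _ _).mpr hd
    omega
  · intro h
    have he : (-(p:Int)) % ((n.natAbs : Nat) : Int) = 0 := by omega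
    have hd : ((n.natAbs : Nat) : Int) ∣ (-(p:Int)) :=
      (PySem.Int.emod_eq_zero_iff_dvd _ _).mp he
    exact Int.natAbs_dvd.mp ((Int.dvd_neg).mp hd)

-- one padding step decreases pvDist by one
lemma pvDist_succ (n : Int) (p : Nat) (hn : n ≠ 0) (h : pvDist n p ≠ 0) :
    pvDist n (p + 1) = pvDist n p - 1 := by
  have ha : (0:Int) < ((n.natAbs : Nat) : Int) := by
    have := Int.natAbs_pos.mpr hn; exact_mod_cast this
  unfold pvDist at *
  simp only [PySem.Int.mod_eq_emod_of_pos ha] at h ⊢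
  have hr0 : 0 ≤ (-(p:Int)) % ((n.natAbs : Nat) : Int) := Int.emod_nonneg _ (by omega)
  have hrlt : (-(p:Int)) % ((n.natAbs : Nat) : Int) < ((n.natAbs : Nat) : Int) :=
    Int.emod_lt_of_pos _ ha
  have hr1 : 1 ≤ (-(p:Int)) % ((n.natAbs : Nat) : Int) := by omega
  have hdm := Int.ediv_add_emod (-(p:Int)) ((n.natAbs : Nat) : Int)
  have hd : ((n.natAbs : Nat) : Int) ∣
      ((-(p:Int) - 1) - ((-(p:Int)) % ((n.natAbs : Nat) : Int) - 1)) :=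
    ⟨(-(p:Int)) / ((n.natAbs : Nat) : Int), by linarith⟩
  have e1 : (-(p:Int) - 1) % ((n.natAbs : Nat) : Int)
      = ((-(p:Int)) % ((n.natAbs : Nat) : Int) - 1) % ((n.natAbs : Nat) : Int) :=
    Int.emod_eq_emod_iff_emod_sub_eq_zero.mpr
        ((PySem.Int.emod_eq_zero_iff_dvd _ _).mpr hd)
  have e2 : ((-(p:Int)) % ((n.natAbs : Nat) : Int) - 1) % ((n.natAbs : Nat) : Int)
      = (-(p:Int)) % ((n.natAbs : Nat) : Int) - 1 :=
    Int.emod_eq_of_lt (by omega) (by omega)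
  have e0 : (-((p:Nat) + 1 : Nat) : Int) = -(p:Int) - 1 := by push_cast; ring
  rw [e0, e1, e2]
  omega

-- shifting the start: pvDist n (L + j) = pvDist n L - j for j ≤ pvDist n L
lemma pvDist_shift (n : Int) (L : Nat) (hn : n ≠ 0) :
    ∀ j, j ≤ pvDist n L → pvDist n (L + j) = pvDist n L - j := by
  intro j
  induction j with
  | zero => intro _; simp
  | succ k ih =>
      intro hk
      have hk' : k ≤ pvDist n L := by omega
      have h1 := ih hk'
      have h2 : pvDist n (L + k) ≠ 0 := by omega
      have := pvDist_succ n (L + k) hn h2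
      rw [(by omega : L + (k+1) = (L + k) + 1), this, h1]
      omega

-- length of the padded state
lemma pvPad_length (cs : List Char) (j : Nat) :
    (if j = 0 then cs else '1' :: List.replicate (cs.length + j - 1) '0').length
      = cs.length + j := by
  rcases j with _ | j
  · simp
  · simp; omega

-- MAIN: A's fueled recursion from the j-th padded state equals B's range scan.
lemma pvMain (cs : List Char) (n lim : Int) (hn : n ≠ 0) :
    ∀ (fuel j : Nat), j ≤ pvDist n cs.length →
      (1 ≤ n ∨ (∃ j' : Nat, j ≤ j' ∧ j' < pvDist n cs.length ∧
        lim < pvInt ('1' :: List.replicate (cs.length + j') '0'))) →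
      pvDist n cs.length - j < fuel →
      next_repeatedFuel fuel (if j = 0 then cs else '1' :: List.replicate (cs.length + j - 1) '0') n lim
        = (match altScan fuel (cs.length + j) (cs.length + pvDist n cs.length) lim with
           | some t => '1' :: List.replicate t '0'
           | none => altBlock (if pvDist n cs.length ≠ 0 then '1' :: List.replicate (cs.length + pvDist n cs.length - 1) '0' else cs)
               n ((cs.length : Int) + ((pvDist n cs.length : Nat) : Int))) := by
  intro fuel
  induction fuel with
  | zero => intro j hj _ hf; omega
  | succ f ih =>
      intro j hj hinv hf
      have hshift := pvDist_shift n cs.length hn j hj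
      rw [next_repeatedFuel, pvPad_length cs j, altScan]
      by_cases hD : j = pvDist n cs.length
      · -- the length is divisible: A enters the block phase, B's scan is past its stop
        have hz : pvDist n (cs.length + j) = 0 := by omega
        have hmod : PySem.Int.mod ((cs.length + j : Nat) : Int) n = 0 :=
          (pvDist_zero_iff n _ hn).mpr hz
        have hstop : ¬ (cs.length + j < cs.length + pvDist n cs.length) := by omega
        simp only [hmod, ne_eq, not_true_eq_false, if_false, hstop]
        have h1n : 1 ≤ n := by
          rcases hinv with h | ⟨j', hle, hlt, _⟩
          · exact h
          · omega
        have hstate : (if j = 0 then cs else '1' :: List.replicate (cs.length + j - 1) '0')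
            = (if pvDist n cs.length ≠ 0 then '1' :: List.replicate (cs.length + pvDist n cs.length - 1) '0' else cs) := by
          rw [← hD]
          by_cases h0 : j = 0 <;> simp [h0]
        rw [hstate, pvBlock_eq _ n h1n]
        have hlen2 : (((if pvDist n cs.length ≠ 0 then '1' :: List.replicate (cs.length + pvDist n cs.length - 1) '0' else cs).length : Nat) : Int)
            = ((cs.length : Int) + ((pvDist n cs.length : Nat) : Int)) := by
          by_cases h0 : pvDist n cs.length = 0
          · simp [h0]
          · simp only [h0, ne_eq, not_false_eq_true, if_true, List.length_cons,
              List.length_replicate]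
            push_cast
            omega
        rw [hlen2]
      · -- a padding step: A pads, B's scan looks at the current t
        have hjlt : j < pvDist n cs.length := lt_of_le_of_ne hj hD
        have hz : pvDist n (cs.length + j) ≠ 0 := by omega
        have hmod : PySem.Int.mod ((cs.length + j : Nat) : Int) n ≠ 0 :=
          fun hc => hz ((pvDist_zero_iff n _ hn).mp hc)
        have hstop : cs.length + j < cs.length + pvDist n cs.length := by omega
        simp only [hmod, ne_eq, not_false_eq_true, if_true, hstop]
        by_cases hgt : lim < pvInt ('1' :: List.replicate (cs.length + j) '0')
        · -- candidate exceeds lim: both return it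
          simp [hgt]
        · -- both continue with the next length
          have hinv' : 1 ≤ n ∨ (∃ j' : Nat, j + 1 ≤ j' ∧ j' < pvDist n cs.length ∧
              lim < pvInt ('1' :: List.replicate (cs.length + j') '0')) := by
            rcases hinv with h | ⟨j', hle, hlt', hbound⟩
            · exact Or.inl h
            · right
              refine ⟨j', ?_, hlt', hbound⟩
              rcases Nat.lt_or_ge j j' with h | h
              · omega
              · exfalso
                apply hgt
                have he : j' = j := by omega
                rw [← he]
                exact hbound
          have this' := ih (j + 1) (by omega) hinv' (by omega)
          have harith : cs.length + (j + 1) - 1 = cs.length + j := by omega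
          simp only [Nat.succ_ne_zero, if_false, harith] at this'
          have hcast : cs.length + (j + 1) = cs.length + j + 1 := by omega
          rw [hcast] at this'
          simp only [gt_iff_lt, hgt, if_false]
          exact this'

-- ===== VERDICT (by name: the statement is the Claim_ definition above) =====
theorem next_repeated_spec : Claim_equal_next_repeated := by
  intro s n lim _ hpre
  unfold Spec_next_repeated next_repeated next_repeated_alt
  have hn : n ≠ 0 := by
    rcases hpre with ⟨h, _⟩ | ⟨h, _⟩ <;> omega
  have hinv : 1 ≤ n ∨ (∃ j' : Nat, 0 ≤ j' ∧ j' < pvDist n s.toList.length ∧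
      lim < pvInt ('1' :: List.replicate (s.toList.length + j') '0')) := by
    rcases hpre with ⟨h, _⟩ | ⟨h1, j', hmem, hb⟩
    · exact Or.inl h
    · refine Or.inr ⟨j', Nat.zero_le _, ?_, hb⟩
      have := List.mem_range.mp hmem
      omega
  have key := pvMain s.toList n lim hn (pvDist n s.toList.length + 1) 0 (Nat.zero_le _) hinv
    (by omega)
  simp only [if_true, Nat.add_zero] at key
  rw [key]
  dsimp only
  cases altScan (pvDist n s.toList.length + 1) s.toList.length
      (s.toList.length + pvDist n s.toList.length) lim <;> rfl
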